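-- pv_equiv track=rewrite | github.com/PolarBearITS/project-euler | 081.py | make_pyramid
-- ===== SOURCE A (Python) =====
-- def make_pyramid(m):
-- 	N = len(m)
-- 	pyramid = []
-- 	for i in range(2*N-1):
-- 		row = []
-- 		for j in range(max(0, i-N+1), min(i+1, N)):
-- 			row.append(m[j][i-j])
-- 		e = (i+1-len(row))//2
-- 		row = [0]*e + row + [0]*e
-- 		pyramid.append(row)
-- 	return pyramid
-- ===== SOURCE B (Python) =====
-- def make_pyramid(m):
--     N = len(m)
--     # scatter: one pass over the matrix, each element lands on its anti-diagonal
--     diag = [[] for _ in range(2*N-1)]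
--     for j, row in enumerate(m):
--         for k in range(N):
--             diag[j+k].append(row[k])
--     # pad: centre each collected diagonal with zeros
--     pyramid = []
--     for i, d in enumerate(diag):
--         e = (i+1-len(d))//2
--         pyramid.append([0]*e + d + [0]*e)
--     return pyramid
-- ===== Notes on version B (the rewrite author's own statement) =====
-- stated objective: alternative
-- what changed: Replaces A's per-diagonal range-bounded gather (computing index bounds max/min for each of the 2N-1 output rows) with a single scatter pass that drops each matrix element onto its anti-diagonal bucket j+k, followed by a padding pass; same O(N^2) cost, different decomposition.
import Mathlib
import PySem

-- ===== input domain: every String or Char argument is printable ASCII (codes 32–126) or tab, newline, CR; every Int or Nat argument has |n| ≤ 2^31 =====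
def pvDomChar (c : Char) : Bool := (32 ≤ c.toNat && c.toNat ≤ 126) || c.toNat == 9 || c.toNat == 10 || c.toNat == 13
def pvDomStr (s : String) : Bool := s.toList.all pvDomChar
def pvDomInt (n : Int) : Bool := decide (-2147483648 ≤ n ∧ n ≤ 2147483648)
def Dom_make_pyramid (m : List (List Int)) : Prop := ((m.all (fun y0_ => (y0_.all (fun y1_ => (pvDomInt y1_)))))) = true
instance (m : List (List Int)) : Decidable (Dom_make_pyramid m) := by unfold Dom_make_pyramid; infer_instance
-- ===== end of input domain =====

-- B replaces A's per-diagonal range-bounded gather with a one-pass scatter onto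
-- anti-diagonals followed by a padding pass (different decomposition, same cost).

-- ===== PORT A =====
-- literal port of A; m[j][i-j] is pyGetD∘pyGetD (in range whenever Pre_ holds, where Python returns)
def make_pyramid (m : List (List Int)) : List (List Int) :=
  let N : Int := (m.length : Int)
  (PySem.List.pyRange 0 (2*N-1) 1).foldl (fun pyramid i =>
    let row : List Int :=
      (PySem.List.pyRange (max 0 (i-N+1)) (min (i+1) N) 1).foldl
        (fun row j => row ++ [PySem.List.pyGetD (PySem.List.pyGetD m j []) (i-j) 0]) []
    let e : Int := PySem.Int.floordiv (i+1-(row.length:Int)) 2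
    pyramid ++ [PySem.List.pyRepeat [(0:Int)] e ++ row ++ PySem.List.pyRepeat [(0:Int)] e]) []

-- ===== PORT B =====
-- literal port of Source B; j+k ≥ 0 always (j,k come from enumerate/range), so .toNat is exact
-- for Python's diag[j+k]; '[[] for _ in range(2*N-1)]' is replicate (2*N-1).toNat.
def make_pyramid_alt (m : List (List Int)) : List (List Int) :=
  let N : Int := (m.length : Int)
  let diag0 : List (List Int) := List.replicate (2*N-1).toNat ([] : List Int)
  let diag := (PySem.List.enumerate m).foldl (fun diag jr =>
    (PySem.List.pyRange 0 N 1).foldl (fun diag k =>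
      diag.modify (jr.1 + k).toNat (fun d => d ++ [PySem.List.pyGetD jr.2 k 0])) diag) diag0
  (PySem.List.enumerate diag).foldl (fun pyramid idp =>
    let e : Int := PySem.Int.floordiv (idp.1+1-(idp.2.length:Int)) 2
    pyramid ++ [PySem.List.pyRepeat [(0:Int)] e ++ idp.2 ++ PySem.List.pyRepeat [(0:Int)] e]) []

-- ===== PRECONDITION & SPEC =====
-- Pre_ excludes exactly the inputs on which Python A raises IndexError: a row shorter
-- than the number of rows is indexed out of range (columns 0..N-1 of every row are read).
def Pre_make_pyramid (m : List (List Int)) : Prop := ∀ r ∈ m, m.length ≤ r.length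
instance (m : List (List Int)) : Decidable (Pre_make_pyramid m) := by unfold Pre_make_pyramid; infer_instance
def pvWitness_make_pyramid : List (List Int) := [[1,2],[3,4]]

def Spec_make_pyramid (m : List (List Int)) (out : List (List Int)) : Prop := out = make_pyramid_alt m
instance (m : List (List Int)) (out : List (List Int)) : Decidable (Spec_make_pyramid m out) := by unfold Spec_make_pyramid; infer_instance

-- ===== CLAIM (what is proved, stated in full; the proofs are below) =====
def Claim_equal_make_pyramid : Prop := ∀ (m : List (List Int)), Dom_make_pyramid m → Pre_make_pyramid m → Spec_make_pyramid m (make_pyramid m)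

-- ===== LEMMAS AND PROOFS =====

def pvContrib (rows : List (List Int)) (t : Nat) (N : Nat) (i : Nat) : List Int :=
  match rows with
  | [] => []
  | r :: rs =>
    (if t ≤ i ∧ i < t + N then [PySem.List.pyGetD r ((i:Int)-(t:Int)) 0] else [])
      ++ pvContrib rs (t+1) N i

lemma pv_inner (r : List Int) (j N : Nat) (D : List (List Int)) (i : Nat) :
    ((List.range N).foldl
        (fun D k => D.modify (j+k) (fun d => d ++ [PySem.List.pyGetD r (k:Int) 0])) D)[i]?
    = if j ≤ i ∧ i < j + N then
        D[i]?.map (fun d => d ++ [PySem.List.pyGetD r ((i:Int)-(j:Int)) 0])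
      else D[i]? := by
  induction N generalizing D with
  | zero => rw [if_neg (by omega)]; simp
  | succ n ih =>
    rw [List.range_succ, List.foldl_append, List.foldl_cons, List.foldl_nil,
        List.getElem?_modify, ih]
    by_cases hij : i = j + n
    · subst hij
      rw [if_neg (by omega : ¬(j ≤ j+n ∧ j+n < j+n)), if_pos (by omega : j ≤ j+n ∧ j+n < j+(n+1))]
      cases D[j+n]? <;> simp
    · have hne : ¬ (j + n = i) := fun h => hij h.symm
      by_cases h2 : j ≤ i ∧ i < j + n
      · rw [if_pos h2, if_pos (by omega : j ≤ i ∧ i < j+(n+1))]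
        cases D[i]? <;> simp [hne]
      · rw [if_neg h2, if_neg (by omega : ¬(j ≤ i ∧ i < j+(n+1)))]
        cases D[i]? <;> simp [hne]

lemma pv_inner_int (r : List Int) (j : Nat) (N : Nat) (D : List (List Int)) :
    (PySem.List.pyRange 0 (N:Int) 1).foldl
        (fun D k => D.modify ((j:Int) + k).toNat (fun d => d ++ [PySem.List.pyGetD r k 0])) D
    = (List.range N).foldl
        (fun D k => D.modify (j+k) (fun d => d ++ [PySem.List.pyGetD r (k:Int) 0])) D := by
  rw [PySem.List.pyRange_zero_natCast, List.foldl_map]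
  congr 1

lemma pv_outer (rows : List (List Int)) (t N : Nat) (D : List (List Int)) (i : Nat) :
    ((PySem.List.enumerate rows (t:Int)).foldl (fun D jr =>
        (PySem.List.pyRange 0 (N:Int) 1).foldl (fun D k =>
          D.modify (jr.1 + k).toNat (fun d => d ++ [PySem.List.pyGetD jr.2 k 0])) D) D)[i]?
    = D[i]?.map (fun d => d ++ pvContrib rows t N i) := by
  induction rows generalizing t D with
  | nil => cases h : D[i]? <;> simp [PySem.List.enumerate_nil, pvContrib, h]
  | cons r rs ih =>
    rw [PySem.List.enumerate_cons, List.foldl_cons]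
    have hcast : (t:Int) + 1 = ((t+1 : Nat) : Int) := by push_cast; ring
    rw [hcast, ih]
    simp only [pv_inner_int, pv_inner]
    cases D[i]?
    · simp [pvContrib]
    · simp only [pvContrib, Option.map_some]
      split_ifs <;> simp_all

lemma pv_foldl_modify_length {β : Type} (xs : List β) (g : β → Nat) (h : β → List Int → List Int)
    (D : List (List Int)) :
    (xs.foldl (fun D k => D.modify (g k) (h k)) D).length = D.length := by
  induction xs generalizing D with
  | nil => rfl
  | cons x xs ih => rw [List.foldl_cons, ih, List.length_modify]

lemma pv_scatter_length (rows : List (List Int)) (t N : Nat) (D : List (List Int)) :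
    ((PySem.List.enumerate rows (t:Int)).foldl (fun D jr =>
        (PySem.List.pyRange 0 (N:Int) 1).foldl (fun D k =>
          D.modify (jr.1 + k).toNat (fun d => d ++ [PySem.List.pyGetD jr.2 k 0])) D) D).length
    = D.length := by
  induction rows generalizing t D with
  | nil => rw [PySem.List.enumerate_nil, List.foldl_nil]
  | cons r rs ih =>
    rw [PySem.List.enumerate_cons, List.foldl_cons]
    have hcast : (t:Int) + 1 = ((t+1 : Nat) : Int) := by push_cast; ring
    rw [hcast, ih]
    exact pv_foldl_modify_length _ (fun k => ((t:Int) + k).toNat)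
      (fun k d => d ++ [PySem.List.pyGetD r k 0]) D

lemma pv_contrib_drop (m : List (List Int)) (i : Nat) :
    ∀ n t, t ≤ m.length → m.length - t = n →
    pvContrib (m.drop t) t m.length i
    = (PySem.List.pyRange (max (t:Int) ((i:Int) - (m.length:Int) + 1)) (min ((i:Int)+1) (m.length:Int)) 1).map
        (fun j => PySem.List.pyGetD (PySem.List.pyGetD m j []) ((i:Int)-j) 0) := by
  intro n
  induction n with
  | zero =>
    intro t ht h0
    have he : t = m.length := by omega
    subst he
    rw [List.drop_length, PySem.List.pyRange_one_eq_nil (by omega)]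
    rfl
  | succ n ih =>
    intro t ht h0
    have htl : t < m.length := by omega
    rw [List.drop_eq_getElem_cons htl]
    simp only [pvContrib]
    rw [ih (t+1) (by omega) (by omega)]
    by_cases hC : t ≤ i ∧ i < t + m.length
    · rw [if_pos hC]
      have hL : max ((t:Nat):Int) ((i:Int)-(m.length:Int)+1) = (t:Int) := by omega
      have hL2 : max (((t+1:Nat)):Int) ((i:Int)-(m.length:Int)+1) = (t:Int)+1 := by push_cast; omega
      rw [hL2, hL,
        PySem.List.pyRange_one_cons (show (t:Int) < min ((i:Int)+1) (m.length:Int) by omega),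
        List.map_cons]
      rw [PySem.List.pyGetD_natCast, List.getD_eq_getElem _ _ htl, List.singleton_append]
    · rw [if_neg hC, List.nil_append]
      by_cases hlt : i < t
      · rw [PySem.List.pyRange_one_eq_nil (by push_cast; omega),
            PySem.List.pyRange_one_eq_nil (by omega)]
      · have hmx : max (((t+1:Nat)):Int) ((i:Int)-(m.length:Int)+1)
            = max ((t:Nat):Int) ((i:Int)-(m.length:Int)+1) := by push_cast; omega
        rw [hmx]

lemma pv_outer0 (rows : List (List Int)) (N : Nat) (D : List (List Int)) (i : Nat) :
    ((PySem.List.enumerate rows).foldl (fun D jr =>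
        (PySem.List.pyRange 0 (N:Int) 1).foldl (fun D k =>
          D.modify (jr.1 + k).toNat (fun d => d ++ [PySem.List.pyGetD jr.2 k 0])) D) D)[i]?
    = D[i]?.map (fun d => d ++ pvContrib rows 0 N i) := by
  have h := pv_outer rows 0 N D i
  simpa using h

lemma pv_scatter_length0 (rows : List (List Int)) (N : Nat) (D : List (List Int)) :
    ((PySem.List.enumerate rows).foldl (fun D jr =>
        (PySem.List.pyRange 0 (N:Int) 1).foldl (fun D k =>
          D.modify (jr.1 + k).toNat (fun d => d ++ [PySem.List.pyGetD jr.2 k 0])) D) D).length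
    = D.length := by
  have h := pv_scatter_length rows 0 N D
  simpa using h

theorem pv_main (m : List (List Int)) : make_pyramid m = make_pyramid_alt m := by
  by_cases h0 : m = []
  · subst h0; rfl
  have hn : 0 < m.length := List.length_pos_iff.mpr h0
  simp only [make_pyramid, make_pyramid_alt]
  rw [show (2*((m.length:Nat):Int)-1) = ((2*m.length-1 : Nat) : Int) by omega]
  rw [PySem.List.pyRange_zero_natCast, List.foldl_map,
      PySem.List.foldl_append_singleton_eq_map, List.nil_append,
      PySem.List.foldl_append_singleton_eq_map, List.nil_append]
  simp only [Int.toNat_natCast]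
  apply List.ext_getElem
  · simp [pv_scatter_length0, PySem.List.length_enumerate]
  · intro i h1 h2
    have hi : i < 2*m.length-1 := by simpa using h1
    have houter := pv_outer0 m m.length (List.replicate (2*m.length-1) ([] : List Int)) i
    rw [List.getElem?_replicate, if_pos hi] at houter
    simp only [Option.map_some, List.nil_append] at houter
    simp only [List.getElem_map, List.getElem_range]
    rw [PySem.List.getElem_enumerate]
    have hdi := (List.getElem_eq_iff (by
      rw [pv_scatter_length0, List.length_replicate]; exact hi)).mpr houter
    rw [hdi]
    have hc := pv_contrib_drop m i m.length 0 (by omega) (by omega)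
    simp only [List.drop_zero, Nat.cast_zero] at hc
    rw [hc]
    rw [PySem.List.foldl_append_singleton_eq_map, List.nil_append]
    simp

-- ===== VERDICT (by name: the statement is the Claim_ definition above) =====
theorem make_pyramid_spec : Claim_equal_make_pyramid := by
  intro m _ _
  unfold Spec_make_pyramid
  exact pv_main m
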